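-- pv_equiv track=rewrite | github.com/velaia/adventofcode2023mojo | day_12/springy.py | get_possible_arangement_checksum
-- ===== SOURCE A (Python) =====
-- def get_possible_arangement_checksum(row, possibility) -> str:
--     questionmark_counter = 0
--     checksum = []
--
--     counting_active = False
--     counter = 0
--     for char in row:
--         if char == "?":
--             if possibility[questionmark_counter] == "0":
--                 char = "."
--             else:
--                 char = "#"
--             questionmark_counter += 1
--
--         if char == "#":
--             counter += 1
--             counting_active = True
--         else:
--             if counting_active:
--                 checksum.append(str(counter))
--                 counting_active = False
--                 counter = 0
--     if counter > 0:
--         checksum.append(str(counter))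
--
--     return ",".join(checksum)
-- ===== SOURCE B (Python) =====
-- def get_possible_arangement_checksum(row, possibility) -> str:
--     # pass 1: resolve the row, normalising every non-'#' char to '.'
--     q = 0
--     resolved = []
--     for c in row:
--         if c == "?":
--             c = "." if possibility[q] == "0" else "#"
--             q += 1
--         resolved.append("#" if c == "#" else ".")
--     # pass 2: the checksum is the lengths of the '#'-runs of the resolved row
--     return ",".join(str(len(r)) for r in "".join(resolved).split(".") if r)
-- ===== Notes on version B (the rewrite author's own statement) =====
-- stated objective: simpler
-- what changed: Single stateful loop (counter + counting_active flag threading run detection through the scan) replaced by two passes: build the resolved row, then split it on '.' and join the lengths of the nonempty fragments.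
import Mathlib
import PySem

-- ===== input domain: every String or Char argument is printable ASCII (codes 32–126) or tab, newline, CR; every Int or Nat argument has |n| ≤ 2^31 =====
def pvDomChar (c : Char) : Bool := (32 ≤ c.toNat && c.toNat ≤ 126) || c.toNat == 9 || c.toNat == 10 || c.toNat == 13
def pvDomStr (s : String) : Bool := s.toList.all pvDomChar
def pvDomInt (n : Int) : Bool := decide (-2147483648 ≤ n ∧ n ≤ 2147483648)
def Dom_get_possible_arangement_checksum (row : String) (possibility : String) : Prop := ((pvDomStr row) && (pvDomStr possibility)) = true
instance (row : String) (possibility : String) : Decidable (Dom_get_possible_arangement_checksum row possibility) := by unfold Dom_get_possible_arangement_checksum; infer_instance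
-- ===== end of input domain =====

-- B replaces A's single stateful run-counting loop by two passes (resolve the row, then
-- split on '.' and join the run lengths); objective: simpler.

-- ===== PORT A =====
-- literal transliteration of A's loop; state = (questionmark_counter, checksum, counting_active, counter)
def pvAgo (poss : List Char) : List Char → Nat → List (List Char) → Bool → Nat → List (List Char)
  | [], _, checksum, _, counter =>
      if counter > 0 then checksum ++ [PySem.Int.toChars (counter : Int)] else checksum
  | c :: rest, qc, checksum, counting_active, counter =>
      let c' := if c = '?'
        then (if (PySem.List.pyGet? poss (qc : Int)).getD '0' = '0' then '.' else '#')
        else c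
      let qc' := if c = '?' then qc + 1 else qc
      if c' = '#' then
        pvAgo poss rest qc' checksum true (counter + 1)
      else
        if counting_active then
          pvAgo poss rest qc' (checksum ++ [PySem.Int.toChars (counter : Int)]) false 0
        else
          pvAgo poss rest qc' checksum counting_active counter

def get_possible_arangement_checksum (row : String) (possibility : String) : String :=
  String.ofList (PySem.Chars.join [','] (pvAgo possibility.toList row.toList 0 [] false 0))

-- ===== PORT B =====
-- pass 1 of Source B: resolve the row, normalising every non-'#' char to '.'
def pvResolve (poss : List Char) : List Char → Nat → List Char
  | [], _ => []
  | c :: rest, q =>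
      if c = '?' then
        (if (PySem.List.pyGet? poss (q : Int)).getD '0' = '0' then '.' else '#')
          :: pvResolve poss rest (q + 1)
      else
        (if c = '#' then '#' else '.') :: pvResolve poss rest q

def get_possible_arangement_checksum_alt (row : String) (possibility : String) : String :=
  String.ofList (PySem.Chars.join [',']
    (((PySem.Chars.splitOn (pvResolve possibility.toList row.toList 0) ['.']).filter
        (fun r => r ≠ [])).map
      (fun r => PySem.Int.toChars (r.length : Int))))

-- ===== PRECONDITION & SPEC =====
-- Pre_ excludes exactly the inputs where Python A raises IndexError: rows with more '?'
-- than possibility has characters.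
def Pre_get_possible_arangement_checksum (row : String) (possibility : String) : Prop :=
  row.toList.count '?' ≤ possibility.toList.length
instance (row : String) (possibility : String) : Decidable (Pre_get_possible_arangement_checksum row possibility) := by unfold Pre_get_possible_arangement_checksum; infer_instance

def pvWitness_get_possible_arangement_checksum : String × String := ("?#.?x#", "10")

def Spec_get_possible_arangement_checksum (row : String) (possibility : String) (out : String) : Prop := out = get_possible_arangement_checksum_alt row possibility
instance (row : String) (possibility : String) (out : String) : Decidable (Spec_get_possible_arangement_checksum row possibility out) := by unfold Spec_get_possible_arangement_checksum; infer_instance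

-- ===== CLAIM (what is proved, stated in full; the proofs are below) =====
def Claim_equal_get_possible_arangement_checksum : Prop := ∀ (row : String) (possibility : String), Dom_get_possible_arangement_checksum row possibility → Pre_get_possible_arangement_checksum row possibility → Spec_get_possible_arangement_checksum row possibility (get_possible_arangement_checksum row possibility)

-- ===== LEMMAS AND PROOFS =====

-- run lengths of the '#'-runs of a {'#','.'} string, with a pending-run counter
def pvRuns : Nat → List Char → List Nat
  | k, [] => if 0 < k then [k] else []
  | k, c :: t => if c = '#' then pvRuns (k + 1) t
      else if 0 < k then k :: pvRuns 0 t else pvRuns 0 t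

-- reference splitter on '.' (cur = current fragment, in order)
def pvSplitD : List Char → List Char → List (List Char)
  | cur, [] => [cur]
  | cur, c :: t => if c = '.' then cur :: pvSplitD [] t else pvSplitD (cur ++ [c]) t

def pvStrN (n : Nat) : List Char := PySem.Int.toChars (n : Int)

theorem pvAgo_runs (poss : List Char) :
    ∀ (l : List Char) (qc : Nat) (checksum : List (List Char)) (counter : Nat),
    pvAgo poss l qc checksum (decide (0 < counter)) counter
      = checksum ++ (pvRuns counter (pvResolve poss l qc)).map pvStrN := by
  intro l
  induction l with
  | nil =>
      intro qc checksum counter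
      simp only [pvAgo, pvResolve, pvRuns]
      split <;> simp [pvStrN]
  | cons c rest ih =>
      intro qc checksum counter
      simp only [pvAgo, pvResolve]
      set x := (PySem.List.pyGet? poss (qc : Int)).getD '0' with hx
      have hdot : ('.' : Char) ≠ '#' := by decide
      have hz : decide (0 < 0) = false := by decide
      have hs : ∀ k : Nat, decide (0 < k + 1) = true := by intro k; simp
      by_cases hq : c = '?'
      · by_cases h0 : x = '0'
        · by_cases hc : 0 < counter
          · have h1 := ih (qc + 1) (checksum ++ [PySem.Int.toChars (counter : Int)]) 0
            rw [hz] at h1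
            simp [hq, h0, hdot, hc, h1, pvRuns, pvStrN]
          · have hc0 : counter = 0 := by omega
            subst hc0
            have h1 := ih (qc + 1) checksum 0
            rw [hz] at h1
            simp [hq, h0, hdot, h1, pvRuns]
        · have h1 := ih (qc + 1) checksum (counter + 1)
          rw [hs] at h1
          simp [hq, h0, h1, pvRuns]
      · by_cases hh : c = '#'
        · have h1 := ih qc checksum (counter + 1)
          rw [hs] at h1
          simp [hh, h1, pvRuns]
        · by_cases hc : 0 < counter
          · have h1 := ih qc (checksum ++ [PySem.Int.toChars (counter : Int)]) 0
            rw [hz] at h1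
            simp [hq, hh, hc, h1, pvRuns, pvStrN]
          · have hc0 : counter = 0 := by omega
            subst hc0
            have h1 := ih qc checksum 0
            rw [hz] at h1
            simp [hq, hh, h1, pvRuns]

theorem pvSplitD_runs :
    ∀ (l cur : List Char), (∀ c ∈ l, c = '#' ∨ c = '.') → (∀ c ∈ cur, c = '#') →
    ((pvSplitD cur l).filter (fun r => r ≠ [])).map List.length = pvRuns cur.length l := by
  intro l
  induction l with
  | nil =>
      intro cur _ _
      cases cur with
      | nil => simp [pvSplitD, pvRuns]
      | cons a t => simp [pvSplitD, pvRuns]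
  | cons c t ih =>
      intro cur hl hcur
      rcases hl c (List.mem_cons_self ..) with h | h
      · subst h
        have hne : ('#' : Char) ≠ '.' := by decide
        simp only [pvSplitD, if_neg hne]
        rw [ih (cur ++ ['#']) (fun c hc => hl c (List.mem_cons_of_mem _ hc))
            (by intro x hx; rcases List.mem_append.mp hx with h | h
                · exact hcur x h
                · simpa using h)]
        simp [pvRuns]
      · subst h
        rw [show pvSplitD cur ('.' :: t) = cur :: pvSplitD [] t from by simp [pvSplitD]]
        rw [List.filter_cons]
        have h2 := ih [] (fun c hc => hl c (List.mem_cons_of_mem _ hc)) (by simp)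
        simp only [List.length_nil] at h2
        by_cases hcn : cur = []
        · subst hcn
          simp [pvRuns]
          simpa using h2
        · have hlen : 0 < cur.length := List.length_pos_of_ne_nil hcn
          simp [hcn, pvRuns, hlen]
          simpa using h2

-- characterisation of PySem.Chars.splitOn.go for the single-char separator ['.']
theorem pvGo_dot : ∀ (fuel : Nat) (l cur : List Char) (acc : List (List Char)),
    l.length < fuel →
    PySem.Chars.splitOn.go ['.'] fuel l cur acc
      = acc.reverse ++ pvSplitD cur.reverse l := by
  intro fuel
  induction fuel with
  | zero => intro l cur acc h; omega
  | succ n ih =>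
      intro l cur acc h
      cases l with
      | nil => simp [PySem.Chars.splitOn.go, pvSplitD]
      | cons c rest =>
          by_cases hc : c = '.'
          · subst hc
            have hp : List.isPrefixOf ['.'] ('.' :: rest) = true := by
              simp [List.isPrefixOf]
            simp only [PySem.Chars.splitOn.go, hp, if_pos,
              show (['.'] : List Char).length = 1 from rfl,
              List.drop_succ_cons, List.drop_zero]
            rw [ih rest [] (cur.reverse :: acc) (by simpa using Nat.lt_of_succ_lt_succ h)]
            simp [pvSplitD]
          · have hp : List.isPrefixOf ['.'] (c :: rest) = false := by
              simp only [List.isPrefixOf, Bool.and_true, beq_eq_false_iff_ne, ne_eq]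
              exact fun h => hc h.symm
            simp only [PySem.Chars.splitOn.go, hp, Bool.false_eq_true, if_false]
            rw [ih rest (c :: cur) acc (by simpa using Nat.lt_of_succ_lt_succ h)]
            simp [pvSplitD, hc]

theorem pvSplitOn_dot (l : List Char) :
    PySem.Chars.splitOn l ['.'] = pvSplitD [] l := by
  unfold PySem.Chars.splitOn
  rw [pvGo_dot (l.length + 1) l [] [] (by omega)]
  simp

theorem pvResolve_chars (poss : List Char) :
    ∀ (l : List Char) (q : Nat), ∀ c ∈ pvResolve poss l q, c = '#' ∨ c = '.' := by
  intro l
  induction l with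
  | nil => intro q c hc; simp [pvResolve] at hc
  | cons a t ih =>
      intro q c hc
      simp only [pvResolve] at hc
      split at hc <;> rename_i h
      · rcases List.mem_cons.mp hc with h' | h'
        · split at h' <;> simp [h']
        · exact ih _ c h'
      · rcases List.mem_cons.mp hc with h' | h'
        · split at h' <;> simp [h']
        · exact ih _ c h'

-- ===== VERDICT (by name: the statement is the Claim_ definition above) =====
theorem get_possible_arangement_checksum_spec : Claim_equal_get_possible_arangement_checksum := by
  intro row possibility _ _
  unfold Spec_get_possible_arangement_checksum
  unfold get_possible_arangement_checksum get_possible_arangement_checksum_alt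
  have hA := pvAgo_runs possibility.toList row.toList 0 [] 0
  simp only [show decide (0 < 0) = false by decide] at hA
  rw [hA]
  rw [pvSplitOn_dot]
  rw [show ∀ (L : List (List Char)), L.map (fun r => PySem.Int.toChars (r.length : Int))
        = (L.map List.length).map pvStrN from
      fun L => by rw [List.map_map]; rfl]
  rw [pvSplitD_runs (pvResolve possibility.toList row.toList 0) []
        (pvResolve_chars _ _ 0) (by simp)]
  simp
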